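-- pv_equiv track=rewrite | github.com/quangminh1212/MTC_Download | solve_key.py | extract_js_strings
-- ===== SOURCE A (Python) =====
-- def extract_js_strings(arr_text):
--     entries = []
--     i = 1
--     while i < len(arr_text) - 1:
--         ch = arr_text[i]
--         if ch in ('"', "'"):
--             q = ch; j = i+1; val = []
--             while j < len(arr_text):
--                 c2 = arr_text[j]
--                 if c2 == '\\' and j+1 < len(arr_text):
--                     val.append({'n':'\n','t':'\t','r':'\r','\\':'\\','"':'"',"'":"'"}.get(arr_text[j+1], arr_text[j+1]))
--                     j += 2; continue
--                 if c2 == q: break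
--                 val.append(c2); j += 1
--             entries.append(''.join(val)); i = j+1
--         else: i += 1
--     return entries
-- ===== SOURCE B (Python) =====
-- def extract_js_strings(arr_text):
--     ESC = {'n': '\n', 't': '\t', 'r': '\r'}
--     entries = []
--     cur = None          # (quote, chars) while inside a string literal
--     esc = False
--     n = len(arr_text)
--     for i in range(1, n):
--         ch = arr_text[i]
--         if cur is None:
--             if i < n - 1 and ch in ('"', "'"):
--                 cur = (ch, [])
--         elif esc:
--             cur[1].append(ESC.get(ch, ch))
--             esc = False
--         elif ch == '\\' and i + 1 < n:
--             esc = True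
--         elif ch == cur[0]:
--             entries.append(''.join(cur[1]))
--             cur = None
--         else:
--             cur[1].append(ch)
--     if cur is not None:
--         entries.append(''.join(cur[1]))
--     return entries
-- ===== Notes on version B (the rewrite author's own statement) =====
-- stated objective: alternative
-- what changed: A's outer scan that restarts a nested inner while-loop (with per-step dict construction) for each string literal is replaced by a single flat pass over the indices keeping explicit state (outside/inside a literal, pending escape) that flushes an unterminated literal at the end.
import Mathlib
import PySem

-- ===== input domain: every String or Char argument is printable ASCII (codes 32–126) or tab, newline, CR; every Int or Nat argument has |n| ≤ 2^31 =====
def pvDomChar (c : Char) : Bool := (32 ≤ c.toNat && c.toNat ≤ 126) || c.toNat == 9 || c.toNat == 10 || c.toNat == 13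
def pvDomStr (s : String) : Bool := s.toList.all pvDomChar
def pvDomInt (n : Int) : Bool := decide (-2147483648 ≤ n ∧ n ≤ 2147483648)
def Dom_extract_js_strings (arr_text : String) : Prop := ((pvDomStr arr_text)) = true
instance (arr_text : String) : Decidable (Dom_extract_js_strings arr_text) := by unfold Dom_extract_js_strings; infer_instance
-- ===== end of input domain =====

-- B replaces A's nested scan loops (outer scan + inner re-scan per literal) by a single
-- flat pass with an explicit (outside/inside-literal, escape-pending) state; objective: alternative.

-- ===== PORT A =====
-- A's escape dictionary .get (the '\\', '"', '\'' entries map to themselves)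
def escMapA (c : Char) : Char :=
  if c = 'n' then '\n' else if c = 't' then '\t' else if c = 'r' then '\r'
  else if c = '\\' then '\\' else if c = '"' then '"' else if c = '\'' then '\'' else c

-- A's inner while loop: collect one literal's chars from index j; returns (val, j at break/end).
-- fuel (cs.length at the call site) only makes the recursion structural; it never runs out,
-- since j strictly increases and the loop stops at j ≥ cs.length.
def innerA (cs : List Char) (q : Char) : Nat → Nat → List Char → List Char × Nat
  | 0, j, val => (val, j)
  | fuel + 1, j, val =>
    if h : j < cs.length then
      let c2 := cs[j]
      if h2 : c2 = '\\' ∧ j + 1 < cs.length then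
        innerA cs q fuel (j + 2) (val ++ [escMapA (cs[j + 1]'h2.2)])
      else if c2 = q then (val, j)
      else innerA cs q fuel (j + 1) (val ++ [c2])
    else (val, j)

-- A's outer while loop (fuel likewise only a structural-totality guard)
def outerA (cs : List Char) : Nat → Nat → List String → List String
  | 0, _, entries => entries
  | fuel + 1, i, entries =>
    if h : i < cs.length - 1 then
      if cs[i]'(by omega) = '"' ∨ cs[i]'(by omega) = '\'' then
        let r := innerA cs (cs[i]'(by omega)) cs.length (i + 1) []
        outerA cs fuel (r.2 + 1) (entries ++ [String.mk r.1])
      else outerA cs fuel (i + 1) entries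
    else entries

def extract_js_strings (arr_text : String) : List String :=
  outerA arr_text.toList arr_text.toList.length 1 []

-- ===== PORT B =====
-- B's escape dictionary .get (only 'n','t','r')
def escMapB (c : Char) : Char :=
  if c = 'n' then '\n' else if c = 't' then '\t' else if c = 'r' then '\r' else c

-- B's loop state: (entries, cur = none | some (quote, buffered chars), esc)
def stepB (n : Nat) (st : List String × Option (Char × List Char) × Bool) (p : Char × Nat) :
    List String × Option (Char × List Char) × Bool :=
  match st with
  | (entries, none, esc) =>
      if p.2 < n - 1 ∧ (p.1 = '"' ∨ p.1 = '\'') then (entries, some (p.1, []), esc)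
      else (entries, none, esc)
  | (entries, some (q, buf), esc) =>
      if esc then (entries, some (q, buf ++ [escMapB p.1]), false)
      else if p.1 = '\\' ∧ p.2 + 1 < n then (entries, some (q, buf), true)
      else if p.1 = q then (entries ++ [String.mk buf], none, esc)
      else (entries, some (q, buf ++ [p.1]), esc)

-- B's final flush of an unterminated literal
def finishB (st : List String × Option (Char × List Char) × Bool) : List String :=
  match st with
  | (entries, none, _) => entries
  | (entries, some (_, buf), _) => entries ++ [String.mk buf]

def extract_js_strings_alt (arr_text : String) : List String :=
  let cs := arr_text.toList
  finishB ((cs.zipIdx.drop 1).foldl (stepB cs.length) ([], none, false))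

-- ===== PRECONDITION & SPEC =====
def Spec_extract_js_strings (arr_text : String) (out : List String) : Prop := out = extract_js_strings_alt arr_text
instance (arr_text : String) (out : List String) : Decidable (Spec_extract_js_strings arr_text out) := by unfold Spec_extract_js_strings; infer_instance

-- ===== CLAIM (what is proved, stated in full; the proofs are below) =====
def Claim_equal_extract_js_strings : Prop := ∀ (arr_text : String), Dom_extract_js_strings arr_text → Spec_extract_js_strings arr_text (extract_js_strings arr_text)

-- ===== LEMMAS AND PROOFS =====

theorem escAB (c : Char) : escMapA c = escMapB c := by
  unfold escMapA escMapB; split_ifs <;> simp_all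

theorem drop_zipIdx_cons (cs : List Char) (j : Nat) (h : j < cs.length) :
    cs.zipIdx.drop j = (cs[j], j) :: cs.zipIdx.drop (j + 1) := by
  rw [List.drop_eq_getElem_cons (by simpa)]
  simp

theorem drop_zipIdx_nil (cs : List Char) (j : Nat) (h : cs.length ≤ j) :
    cs.zipIdx.drop j = [] := by
  apply List.drop_eq_nil_of_le; simpa

-- from index ≥ len-1 with no open literal, nothing more is emitted
theorem tail_none (cs : List Char) (i : Nat) (hi : cs.length - 1 ≤ i)
    (entries : List String) (e : Bool) :
    finishB ((cs.zipIdx.drop i).foldl (stepB cs.length) (entries, none, e)) = entries := by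
  by_cases h : cs.length ≤ i
  · rw [drop_zipIdx_nil cs i h]; rfl
  · have hlt : i < cs.length := by omega
    rw [drop_zipIdx_cons cs i hlt, List.foldl_cons]
    have s0 : stepB cs.length (entries, none, e) (cs[i], i) = (entries, none, e) := by
      simp only [stepB]
      exact if_neg (fun hc => absurd hc.1 (by omega))
    rw [s0, drop_zipIdx_nil cs (i + 1) (by omega)]; rfl

-- the inner loop's index never decreases
theorem inner_ge (cs : List Char) (q : Char) (fuel j : Nat) (val : List Char) :
    j ≤ (innerA cs q fuel j val).2 := by
  induction fuel generalizing j val with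
  | zero => simp [innerA]
  | succ fuel ih =>
    simp only [innerA]
    split
    · split
      · exact le_trans (by omega) (ih _ _)
      · split
        · simp
        · exact le_trans (by omega) (ih _ _)
    · simp

-- B's flat pass inside a literal simulates A's inner loop
theorem inner_sim (cs : List Char) (q : Char) (fuel j : Nat) (val : List Char)
    (entries : List String) (hf : cs.length ≤ j + fuel) :
    finishB ((cs.zipIdx.drop j).foldl (stepB cs.length) (entries, some (q, val), false)) =
      (let r := innerA cs q fuel j val
       if r.2 < cs.length then
         finishB ((cs.zipIdx.drop (r.2 + 1)).foldl (stepB cs.length)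
            (entries ++ [String.mk r.1], none, false))
       else entries ++ [String.mk r.1]) := by
  induction fuel generalizing j val entries with
  | zero =>
    rw [drop_zipIdx_nil cs j (by omega)]
    simp only [innerA]
    rw [if_neg (by omega)]
    rfl
  | succ fuel ih =>
    by_cases h : j < cs.length
    · rw [drop_zipIdx_cons cs j h, List.foldl_cons]
      by_cases h2 : cs[j] = '\\' ∧ j + 1 < cs.length
      · have s1 : stepB cs.length (entries, some (q, val), false) (cs[j], j)
            = (entries, some (q, val), true) := by
          simp only [stepB, Bool.false_eq_true, if_false]
          rw [if_pos h2]
        rw [s1, drop_zipIdx_cons cs (j + 1) h2.2, List.foldl_cons]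
        have s2 : stepB cs.length (entries, some (q, val), true) (cs[j + 1]'h2.2, j + 1)
            = (entries, some (q, val ++ [escMapB (cs[j + 1]'h2.2)]), false) := by
          simp only [stepB, if_true]
        rw [s2, ← escAB, ih (j + 2) _ entries (by omega)]
        simp only [innerA, dif_pos h, dif_pos h2]
      · by_cases hq : cs[j] = q
        · have s1 : stepB cs.length (entries, some (q, val), false) (cs[j], j)
              = (entries ++ [String.mk val], none, false) := by
            simp only [stepB, Bool.false_eq_true, if_false]
            rw [if_neg h2, if_pos hq]
          rw [s1]
          simp only [innerA, dif_pos h, dif_neg h2, if_pos hq, if_pos h]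
        · have s1 : stepB cs.length (entries, some (q, val), false) (cs[j], j)
              = (entries, some (q, val ++ [cs[j]]), false) := by
            simp only [stepB, Bool.false_eq_true, if_false]
            rw [if_neg h2, if_neg hq]
          rw [s1, ih (j + 1) _ entries (by omega)]
          simp only [innerA, dif_pos h, dif_neg h2, if_neg hq]
    · rw [drop_zipIdx_nil cs j (by omega)]
      simp only [innerA, dif_neg h]
      rw [if_neg (by omega)]
      rfl

-- B's flat pass outside a literal simulates A's outer loop
theorem outer_sim (cs : List Char) (fuel i : Nat) (entries : List String)
    (hf : cs.length - 1 ≤ i + fuel) :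
    outerA cs fuel i entries =
      finishB ((cs.zipIdx.drop i).foldl (stepB cs.length) (entries, none, false)) := by
  induction fuel generalizing i entries with
  | zero =>
    rw [tail_none cs i (by omega)]
    rfl
  | succ fuel ih =>
    by_cases h : i < cs.length - 1
    · have hi : i < cs.length := by omega
      rw [drop_zipIdx_cons cs i hi, List.foldl_cons]
      by_cases hq : cs[i] = '"' ∨ cs[i] = '\''
      · have s1 : stepB cs.length (entries, none, false) (cs[i], i)
            = (entries, some (cs[i], []), false) := by
          simp only [stepB]
          exact if_pos ⟨h, hq⟩
        rw [s1, inner_sim cs (cs[i]) cs.length (i + 1) [] entries (by omega)]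
        have hge := inner_ge cs (cs[i]) cs.length (i + 1) []
        simp only [outerA, dif_pos h, if_pos hq]
        by_cases hr : (innerA cs cs[i] cs.length (i + 1) []).2 < cs.length
        · rw [if_pos hr]
          exact ih _ _ (by omega)
        · rw [if_neg hr, ih _ _ (by omega),
            tail_none cs ((innerA cs cs[i] cs.length (i + 1) []).2 + 1) (by omega)]
      · have s1 : stepB cs.length (entries, none, false) (cs[i], i)
            = (entries, none, false) := by
          simp only [stepB]
          exact if_neg (by tauto)
        rw [s1, ← ih _ _ (by omega)]
        simp only [outerA, dif_pos h, if_neg hq]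
    · rw [tail_none cs i (by omega)]
      simp only [outerA, dif_neg h]

-- ===== VERDICT (by name: the statement is the Claim_ definition above) =====
theorem extract_js_strings_spec : Claim_equal_extract_js_strings := by
  intro s _
  unfold Spec_extract_js_strings extract_js_strings extract_js_strings_alt
  exact (outer_sim s.toList s.toList.length 1 [] (by omega)).symm ▸ rfl
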